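-- pv_equiv track=rewrite | github.com/AP-MI-2021/lab-3-PaulaTurdean | lab-3.py | get_longest_div_k
-- ===== SOURCE A (Python) =====
-- def toate_elementele_div_k(lst: list[int], k: int):
--     """
--     Determina daca toate elementele dintr-o lista sunt divizibile cu un numar dat
--     :param lst: Lista verificata
--     :param k: Numarul intreg cu care se verifica divizibilitatea
--     :return: Returneaza True daca toate elementele din lista sunt divizibile cu k si False in caz contrar
--     """
--     for x in lst:
--         if x % k != 0:
--             return False
--     return True
--
-- def get_longest_div_k(lst: list[int], k: int) -> list[int]:
--     """
--     Determina cea mai lunga subsecventa de numere divizibile cu k (dintr-o lista)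
--     :param lst: Lista initiala
--     :param k: Numarul intreg cu care se verifica divizibilitatea
--     :return: Returneaza o lista de numere divizibile cu k (cea mai lunga)
--     """
--     subsecventa = []
--     n = len(lst)
--     for i in range(n):
--         for j in range(i, n):
--             if toate_elementele_div_k(lst[i:j + 1], k) is True and len(lst[i:j + 1]) > len(subsecventa):
--                 subsecventa = lst[i:j + 1]
--     return subsecventa
-- ===== SOURCE B (Python) =====
-- def get_longest_div_k(lst: list[int], k: int) -> list[int]:
--     """Single left-to-right pass: grow the current divisible run, keep the
--     first strictly-longest run seen so far."""
--     best = []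
--     cur = []
--     for x in lst:
--         if x % k == 0:
--             cur = cur + [x]
--             if len(cur) > len(best):
--                 best = cur
--         else:
--             cur = []
--     return best
-- ===== Notes on version B (the rewrite author's own statement) =====
-- stated objective: faster
-- what changed: Replaces the triple-nested enumerate-all-slices-and-recheck loop with a single left-to-right pass that grows the current divisible run and keeps the first strictly-longest one.
import Mathlib
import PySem

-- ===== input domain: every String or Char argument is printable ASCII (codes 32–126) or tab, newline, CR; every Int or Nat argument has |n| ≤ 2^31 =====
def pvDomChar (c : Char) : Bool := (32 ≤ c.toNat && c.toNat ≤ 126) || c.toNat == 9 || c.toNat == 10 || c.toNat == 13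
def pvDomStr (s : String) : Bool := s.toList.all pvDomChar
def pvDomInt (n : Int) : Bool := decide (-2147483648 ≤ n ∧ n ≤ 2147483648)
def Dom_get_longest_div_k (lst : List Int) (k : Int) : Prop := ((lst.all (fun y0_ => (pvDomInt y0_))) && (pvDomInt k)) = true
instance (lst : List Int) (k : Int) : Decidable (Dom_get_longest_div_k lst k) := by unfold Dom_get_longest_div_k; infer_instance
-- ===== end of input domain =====

-- B replaces A's triple-nested all-slices scan by a single pass that grows the
-- current divisible run and keeps the first strictly-longest run (faster).

-- ===== PORT A =====
def toate_elementele_div_k (lst : List Int) (k : Int) : Bool :=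
  match lst with
  | [] => true
  | x :: xs => if PySem.Int.mod x k ≠ 0 then false else toate_elementele_div_k xs k

def get_longest_div_k (lst : List Int) (k : Int) : List Int :=
  (PySem.List.pyRange 0 (lst.length : Int) 1).foldl (fun sub i =>
    (PySem.List.pyRange i (lst.length : Int) 1).foldl (fun sub j =>
      let s := PySem.List.slice lst (some i) (some (j + 1))
      if toate_elementele_div_k s k = true ∧ s.length > sub.length then s else sub) sub) []

-- ===== PORT B =====
def get_longest_div_k_alt (lst : List Int) (k : Int) : List Int :=
  (lst.foldl (fun (st : List Int × List Int) x =>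
    if PySem.Int.mod x k == 0 then
      let c := st.2 ++ [x]
      (if c.length > st.1.length then c else st.1, c)
    else (st.1, ([] : List Int))) ([], [])).1

-- ===== PRECONDITION & SPEC =====
-- Pre_ excludes k = 0 with a nonempty list: there Python's `x % 0` raises ZeroDivisionError (in A and in B).
def Pre_get_longest_div_k (lst : List Int) (k : Int) : Prop := lst = [] ∨ k ≠ 0
instance (lst : List Int) (k : Int) : Decidable (Pre_get_longest_div_k lst k) := by unfold Pre_get_longest_div_k; infer_instance
def pvWitness_get_longest_div_k : List Int × Int := ([6, 3, 4], 3)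

def Spec_get_longest_div_k (lst : List Int) (k : Int) (out : List Int) : Prop := out = get_longest_div_k_alt lst k
instance (lst : List Int) (k : Int) (out : List Int) : Decidable (Spec_get_longest_div_k lst k out) := by unfold Spec_get_longest_div_k; infer_instance

-- ===== CLAIM (what is proved, stated in full; the proofs are below) =====
def Claim_equal_get_longest_div_k : Prop := ∀ (lst : List Int) (k : Int), Dom_get_longest_div_k lst k → Pre_get_longest_div_k lst k → Spec_get_longest_div_k lst k (get_longest_div_k lst k)

-- ===== LEMMAS AND PROOFS =====

-- divisibility test used by both programs
def pvP (k x : Int) : Bool := PySem.Int.mod x k == 0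

lemma toate_eq_all (k : Int) (l : List Int) :
    toate_elementele_div_k l k = l.all (pvP k) := by
  induction l with
  | nil => rfl
  | cons x xs ih =>
    by_cases h : PySem.Int.mod x k = 0 <;>
      simp [toate_elementele_div_k, pvP, h, ih]

lemma all_take_iff (p : Int → Bool) :
    ∀ (d : List Int) (t : Nat), t ≤ d.length →
      ((d.take t).all p = true ↔ t ≤ (d.takeWhile p).length) := by
  intro d
  induction d with
  | nil => intro t ht; simp at ht; simp [ht]
  | cons x xs ih =>
    intro t ht
    cases t with
    | zero => simp
    | succ s =>
      by_cases hx : p x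
      · simp only [List.take_succ_cons, List.all_cons, hx, Bool.true_and,
          List.takeWhile_cons_of_pos hx, List.length_cons]
        rw [ih s (by simpa using ht)]
        omega
      · simp [hx, List.takeWhile_cons_of_neg hx]

lemma take_takeWhile (p : Int → Bool) :
    ∀ d : List Int, d.take (d.takeWhile p).length = d.takeWhile p := by
  intro d
  induction d with
  | nil => rfl
  | cons x xs ih =>
    by_cases hx : p x
    · simp [List.takeWhile_cons_of_pos hx, ih]
    · simp [List.takeWhile_cons_of_neg hx]

-- the inner j-loop over prefixes of d, phrased over List.range
lemma inner_range (k : Int) (d : List Int) :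
    ∀ (T : Nat), T ≤ d.length → ∀ sub : List Int,
      (List.range T).foldl (fun sub t =>
          if toate_elementele_div_k (d.take (t+1)) k = true ∧ (d.take (t+1)).length > sub.length
          then d.take (t+1) else sub) sub
        = if min (d.takeWhile (pvP k)).length T > sub.length
          then d.take (min (d.takeWhile (pvP k)).length T) else sub := by
  intro T
  induction T with
  | zero => intro _ sub; simp
  | succ T ih =>
    intro hT sub
    rw [List.range_succ, List.foldl_append, ih (by omega) sub]
    simp only [List.foldl_cons, List.foldl_nil]
    have hlen : (d.take (T+1)).length = T + 1 := by
      simp [List.length_take]; omega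
    have hall : toate_elementele_div_k (d.take (T+1)) k = true ↔
        T + 1 ≤ (d.takeWhile (pvP k)).length := by
      rw [toate_eq_all]; exact all_take_iff (pvP k) d (T+1) hT
    have hTl : (d.take T).length = T := by simp [List.length_take]; omega
    set r := (d.takeWhile (pvP k)).length with hr
    by_cases hc : T + 1 ≤ r
    · have htt : toate_elementele_div_k (d.take (T+1)) k = true := hall.mpr hc
      have hminT : min r T = T := by omega
      have hmin : min r (T+1) = T + 1 := by omega
      rw [hminT, hmin, htt]
      simp only [true_and, hlen]
      split_ifs <;> first | rfl | (exfalso; simp only [hTl] at *; omega)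
    · have hmin : min r (T+1) = min r T := by omega
      rw [if_neg (by rw [hall]; omega), hmin]

-- the outer i-loop as a recursion over suffixes
def pvG (k : Int) : List Int → List Int → List Int
  | acc, [] => acc
  | acc, x :: xs =>
      pvG k (if ((x :: xs).takeWhile (pvP k)).length > acc.length
             then (x :: xs).takeWhile (pvP k) else acc) xs

lemma outer_range (k : Int) :
    ∀ (l : List Int) (acc : List Int),
      (List.range l.length).foldl (fun sub a =>
          if ((l.drop a).takeWhile (pvP k)).length > sub.length
          then (l.drop a).takeWhile (pvP k) else sub) acc = pvG k acc l := by
  intro l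
  induction l with
  | nil => intro acc; simp [pvG]
  | cons x xs ih =>
    intro acc
    rw [List.length_cons, List.range_succ_eq_map, List.foldl_cons, List.foldl_map]
    simpa [pvG] using ih _

-- A's whole computation equals pvG
lemma portA_eq_pvG (lst : List Int) (k : Int) :
    get_longest_div_k lst k = pvG k [] lst := by
  unfold get_longest_div_k
  rw [PySem.List.pyRange_one,
      show ((lst.length : Int) - 0).toNat = lst.length by omega,
      List.foldl_map, ← outer_range k lst []]
  apply PySem.List.foldl_congr_mem
  intro sub a ha
  have ha' : a < lst.length := List.mem_range.mp ha
  have hTn : ((lst.length : Int) - ((0:Int) + (a:Int))).toNat = (lst.drop a).length := by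
    rw [List.length_drop]; omega
  rw [PySem.List.pyRange_one, List.foldl_map, hTn]
  have harg : ∀ t : Nat,
      PySem.List.slice lst (some ((0:Int) + (a:Int))) (some ((0:Int) + (a:Int) + (t:Int) + 1))
        = (lst.drop a).take (t + 1) := by
    intro t
    have h1 : ((0:Int) + (a:Int)).toNat = a := by omega
    have h2 : ((0:Int) + (a:Int) + (t:Int) + 1).toNat = a + t + 1 := by omega
    rw [PySem.List.slice_toNat lst (a := (0:Int) + (a:Int)) (b := (0:Int) + (a:Int) + (t:Int) + 1)
        (by omega) (by omega), h1, h2,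
      show a + t + 1 - a = t + 1 from by omega]
  refine Eq.trans (PySem.List.foldl_congr_mem _ _
      (fun sub t => if toate_elementele_div_k ((lst.drop a).take (t+1)) k = true ∧
          ((lst.drop a).take (t+1)).length > sub.length
        then (lst.drop a).take (t+1) else sub) sub ?_) ?_
  · intro acc t _
    simp only [harg t]
  · rw [inner_range k (lst.drop a) (lst.drop a).length le_rfl sub,
        min_eq_left (List.takeWhile_sublist _).length_le, take_takeWhile]

-- the single-pass invariant: pvG with the "caught-up" accumulator equals B's fold
lemma alt_inv (k : Int) :
    ∀ (l best cur acc : List Int),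
      (∀ x ∈ cur, pvP k x = true) → cur.length ≤ best.length →
      acc = (if cur = [] then best
             else if (cur ++ l.takeWhile (pvP k)).length > best.length
                  then cur ++ l.takeWhile (pvP k) else best) →
      pvG k acc l = (l.foldl (fun (st : List Int × List Int) x =>
        if PySem.Int.mod x k == 0 then
          (if (st.2 ++ [x]).length > st.1.length then st.2 ++ [x] else st.1, st.2 ++ [x])
        else (st.1, ([] : List Int))) (best, cur)).1 := by
  intro l
  induction l with
  | nil =>
    intro best cur acc hcur hle hacc
    simp only [pvG, List.foldl_nil]
    rw [hacc]
    split_ifs with h1 h2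
    · rfl
    · simp at h2; omega
    · rfl
  | cons x xs ih =>
    intro best cur acc hcur hle hacc
    simp only [List.foldl_cons]
    by_cases hx : pvP k x
    · have hx' : (PySem.Int.mod x k == 0) = true := hx
      simp only [hx', if_true]
      set c := cur ++ [x] with hc
      set best' := if c.length > best.length then c else best with hb'
      have hW : (x :: xs).takeWhile (pvP k) = x :: xs.takeWhile (pvP k) :=
        List.takeWhile_cons_of_pos hx
      set tw := xs.takeWhile (pvP k) with htw
      have hcc : cur ++ (x :: xs).takeWhile (pvP k) = c ++ tw := by
        simp [hc, hW]
      clear_value tw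
      show pvG k acc (x :: xs) = _
      simp only [pvG, hW]
      apply ih best' c _
        (by intro y hy; rcases List.mem_append.mp hy with h | h
            · exact hcur y h
            · simp at h; subst h; exact hx)
        (by rw [hb']; split_ifs with h <;> omega)
      -- the pvG-updated accumulator has the invariant shape for (best', c)
      rw [if_neg (show c ≠ [] by simp [hc])]
      by_cases h0 : cur = []
      · have haccb : acc = best := by rw [hacc, if_pos h0]
        have hcx : c = [x] := by simp [hc, h0]
        have hR : c ++ tw = x :: tw := by simp [hcx]
        rw [haccb, hR, hb', hcx]
        by_cases g : [x].length > best.length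
        · have hb0 : best = [] := by simpa using g
          rw [if_pos g, hb0, if_pos (by simp)]
          cases tw with
          | nil => simp
          | cons y ys => rw [if_pos (by simp)]
        · rw [if_neg g]
      · have hacc' : acc = if (c ++ tw).length > best.length then c ++ tw else best := by
          rw [hacc, if_neg h0, hcc]
        have hcl : c.length = cur.length + 1 := by simp [hc]
        have hup : (if (c ++ tw).length > best.length then c ++ tw else best)
            = if (c ++ tw).length > best'.length then c ++ tw else best' := by
          rw [hb']
          by_cases g : c.length > best.length
          · rw [if_pos g,
                if_pos (show (c ++ tw).length > best.length by
                  simp only [List.length_append]; omega)]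
            by_cases g2 : (c ++ tw).length > c.length
            · rw [if_pos g2]
            · rw [if_neg g2]
              have : tw = [] := by
                apply List.eq_nil_iff_length_eq_zero.mpr
                simp only [List.length_append] at g2; omega
              simp [this]
          · rw [if_neg g]
        have hwle : (x :: tw).length ≤ acc.length := by
          rw [hacc']
          split_ifs with g <;> simp only [List.length_cons, List.length_append] at g ⊢ <;> omega
        rw [if_neg (by omega), hacc', hup]
    · have hx' : (PySem.Int.mod x k == 0) = false := by simpa [pvP] using hx
      simp only [hx', Bool.false_eq_true, if_false]
      have hW : (x :: xs).takeWhile (pvP k) = [] := List.takeWhile_cons_of_neg hx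
      have haccb : acc = best := by
        rw [hacc]
        split_ifs with h1 h2
        · rfl
        · exfalso; rw [hW] at h2; simp at h2; omega
        · rfl
      show pvG k acc (x :: xs) = _
      simp only [pvG, hW]
      rw [if_neg (by simp)]
      exact ih best [] acc (by simp) (by simp) (by simp [haccb])

lemma portB_eq_pvG (lst : List Int) (k : Int) :
    get_longest_div_k_alt lst k = pvG k [] lst := by
  unfold get_longest_div_k_alt
  exact (alt_inv k lst [] [] [] (by simp) (by simp) (by simp)).symm

-- ===== VERDICT (by name: the statement is the Claim_ definition above) =====
theorem get_longest_div_k_spec : Claim_equal_get_longest_div_k := by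
  intro lst k _ _
  unfold Spec_get_longest_div_k
  rw [portA_eq_pvG, portB_eq_pvG]
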